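-- pv_equiv track=rewrite | github.com/xsjmonk/agent-long-term-memory | agent_embedding_builder/app/config_jsonc_preprocessor.py | _read_path_string
-- ===== SOURCE A (Python) =====
-- def _read_path_string(text: str, start: int) -> tuple[int, str]:
--     chars: list[str] = []
--     i = start + 1
--     while i < len(text):
--         ch = text[i]
--         if ch == '"' and _looks_like_string_end(text, i + 1):
--             return i, "".join(chars)
--         chars.append(ch)
--         i += 1
--     raise ValueError("Unterminated path string in operator config")
--
-- def _looks_like_string_end(text: str, idx: int) -> bool:
--     nxt = _peek_next_significant(text, idx)
--     return nxt in {",", "}", "]", ":"}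
--
-- def _peek_next_significant(text: str, idx: int) -> str | None:
--     i = idx
--     while i < len(text):
--         ch = text[i]
--         nxt = text[i + 1] if i + 1 < len(text) else ""
--         if ch.isspace():
--             i += 1
--             continue
--         if ch == "/" and nxt == "/":
--             end = text.find("\n", i)
--             if end == -1:
--                 return None
--             i = end + 1
--             continue
--         if ch == "/" and nxt == "*":
--             end = text.find("*/", i + 2)
--             if end == -1:
--                 return None
--             i = end + 2
--             continue
--         return ch
--     return None
-- ===== SOURCE B (Python) =====
-- def _read_path_string(text: str, start: int) -> tuple[int, str]:
--     i = start + 1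
--     while True:
--         q = text.find('"', i)
--         if q == -1:
--             raise ValueError("Unterminated path string in operator config")
--         if _looks_like_string_end(text, q + 1):
--             return q, text[start + 1:q]
--         i = q + 1
--
-- def _looks_like_string_end(text: str, idx: int) -> bool:
--     nxt = _peek_next_significant(text, idx)
--     return nxt in {",", "}", "]", ":"}
--
-- def _peek_next_significant(text: str, idx: int) -> str | None:
--     i = idx
--     while i < len(text):
--         ch = text[i]
--         nxt = text[i + 1] if i + 1 < len(text) else ""
--         if ch.isspace():
--             i += 1
--             continue
--         if ch == "/" and nxt == "/":
--             end = text.find("\n", i)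
--             if end == -1:
--                 return None
--             i = end + 1
--             continue
--         if ch == "/" and nxt == "*":
--             end = text.find("*/", i + 2)
--             if end == -1:
--                 return None
--             i = end + 2
--             continue
--         return ch
--     return None
-- ===== Notes on version B (the rewrite author's own statement) =====
-- stated objective: alternative
-- what changed: B replaces A's char-by-char while-loop with a list accumulator by repeated text.find('"', i) jumps from quote to quote and returns the slice text[start+1:q] instead of joining appended chars.
-- outside the precondition, e.g. on _read_path_string('x"a", ', -2): A returns (3, ' x"a'), B raises ValueError
import Mathlib
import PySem

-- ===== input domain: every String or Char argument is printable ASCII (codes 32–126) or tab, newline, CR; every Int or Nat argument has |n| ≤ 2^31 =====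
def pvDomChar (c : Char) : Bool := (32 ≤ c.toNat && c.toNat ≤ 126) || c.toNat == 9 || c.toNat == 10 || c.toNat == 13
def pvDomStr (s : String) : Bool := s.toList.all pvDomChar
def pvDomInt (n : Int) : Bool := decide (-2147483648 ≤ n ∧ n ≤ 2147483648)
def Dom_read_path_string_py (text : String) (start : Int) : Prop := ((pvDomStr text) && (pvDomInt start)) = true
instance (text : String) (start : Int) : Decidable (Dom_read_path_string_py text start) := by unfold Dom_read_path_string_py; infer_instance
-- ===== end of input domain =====

-- B replaces A's char-by-char walk + list accumulator by find-based quote-to-quote jumps and a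
-- single slice (objective: alternative traversal; same helpers _looks_like_string_end/_peek_next_significant).

-- Shared helper: port of _peek_next_significant (fuel makes the while-loop total; the index
-- strictly increases each iteration, so fuel cs.length+1 is exact for every call with idx ≥ 0).
def pvPeekSig (cs : List Char) : Nat → Int → Option Char
  | 0, _ => none
  | f+1, i =>
    if i < (cs.length : Int) then
      match PySem.List.pyGet? cs i with
      | none => none   -- unreachable for 0 ≤ i < len
      | some ch =>
        let nxt : Option Char := if i + 1 < (cs.length : Int) then PySem.List.pyGet? cs (i+1) else none
        if PySem.Chars.isspace ch then pvPeekSig cs f (i+1)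
        else if ch == '/' && nxt == some '/' then
          let e := PySem.Chars.findFrom cs ['\n'] i none
          if e == -1 then none else pvPeekSig cs f (e+1)
        else if ch == '/' && nxt == some '*' then
          let e := PySem.Chars.findFrom cs ['*', '/'] (i+2) none
          if e == -1 then none else pvPeekSig cs f (e+2)
        else some ch
    else none

-- Shared helper: port of _looks_like_string_end (None is not in the set, hence false).
def pvStringEnd (cs : List Char) (idx : Int) : Bool :=
  match pvPeekSig cs (cs.length + 1) idx with
  | some c => c == ',' || c == '}' || c == ']' || c == ':'
  | none => false

-- ===== PORT A =====
-- A's while-loop: i walks one char at a time, acc accumulates the chars seen (Python appends,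
-- "".join at the return).  (0, "") stands for the raising paths, all excluded by Pre_.
def pvALoop (cs : List Char) : Nat → Int → List Char → Int × String
  | 0, _, _ => (0, "")
  | f+1, i, acc =>
    if i < (cs.length : Int) then
      match PySem.List.pyGet? cs i with
      | none => (0, "")   -- IndexError (negative i out of range; outside Pre_)
      | some ch =>
        if ch == '"' && pvStringEnd cs (i+1) then (i, String.ofList acc)
        else pvALoop cs f (i+1) (acc ++ [ch])
    else (0, "")          -- ValueError: unterminated (outside Pre_)

def read_path_string_py (text : String) (start : Int) : Int × String :=
  pvALoop text.toList (text.toList.length + 1) (start + 1) []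

-- ===== PORT B =====
-- B's loop: jump to the next '"' with find; return the slice text[start+1:q] when it terminates.
def pvBLoop (cs : List Char) (start : Int) : Nat → Int → Int × String
  | 0, _ => (0, "")
  | f+1, i =>
    let q := PySem.Chars.findFrom cs ['"'] i none
    if q == -1 then (0, "")   -- ValueError: unterminated (outside Pre_)
    else if pvStringEnd cs (q+1) then (q, String.ofList (PySem.List.slice cs (some (start+1)) (some q)))
    else pvBLoop cs start f (q+1)

def read_path_string_py_alt (text : String) (start : Int) : Int × String :=
  pvBLoop text.toList start (text.toList.length + 1) (start + 1)

-- ===== PRECONDITION & SPEC =====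
-- "index j terminates the string": a '"' there whose following significant char closes it.
def pvTerm (cs : List Char) (j : Nat) : Bool :=
  (cs[j]? == some '"') && pvStringEnd cs ((j : Int) + 1)

-- Pre_ says: some '"' after start is followed — skipping whitespace and // or /* comments, which is
-- what pvStringEnd/pvPeekSig (the shared port of the module's own _looks_like_string_end helper)
-- decides — by one of , } ] :.  A's exact returns-domain depends on that comment-skipping notion of
-- "next significant character"; no simpler closed form exists.  Pre_ never touches A's main loop.
-- Pre_ excludes (a) unterminated path strings, where A raises ValueError (and B raises too), and
-- (b) start ≤ -2, outside the natural domain, where A's values come from Python's negative-index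
-- wraparound (it scans from the END of the text) and B's find clamps differently or raises.
def Pre_read_path_string_py (text : String) (start : Int) : Prop :=
  -1 ≤ start ∧
    ((List.range text.toList.length).any
      (fun j => decide (start < (j : Int)) && pvTerm text.toList j)) = true
instance (text : String) (start : Int) : Decidable (Pre_read_path_string_py text start) := by
  unfold Pre_read_path_string_py; infer_instance

def pvWitness_read_path_string_py : String × Int := ("\"a\",", 0)

def Spec_read_path_string_py (text : String) (start : Int) (out : Int × String) : Prop :=
  out = read_path_string_py_alt text start
instance (text : String) (start : Int) (out : Int × String) : Decidable (Spec_read_path_string_py text start out) := by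
  unfold Spec_read_path_string_py; infer_instance

-- ===== CLAIM (what is proved, stated in full; the proofs are below) =====
def Claim_equal_read_path_string_py : Prop :=
  ∀ (text : String) (start : Int), Dom_read_path_string_py text start →
    Pre_read_path_string_py text start →
    Spec_read_path_string_py text start (read_path_string_py text start)

-- ===== LEMMAS AND PROOFS =====

-- Reference: the first terminating index ≥ k, if any.
def pvFt (cs : List Char) (k : Nat) : Option Nat :=
  if h : k < cs.length then
    (if pvTerm cs k then some k else pvFt cs (k+1))
  else none
termination_by cs.length - k

theorem pvFt_stop (cs : List Char) (k : Nat) (h : ¬ k < cs.length) : pvFt cs k = none := by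
  rw [pvFt]; simp [h]

theorem pvFt_ge (cs : List Char) (k j : Nat) (h : pvFt cs k = some j) :
    k ≤ j ∧ j < cs.length ∧ pvTerm cs j = true := by
  rw [pvFt] at h
  split at h
  next hlt =>
    split at h
    next hterm => cases h; exact ⟨Nat.le_refl _, hlt, hterm⟩
    next => have ih := pvFt_ge cs (k+1) j h; exact ⟨by omega, ih.2⟩
  next => cases h
termination_by cs.length - k

theorem pvFt_none (cs : List Char) (k : Nat) (h : ∀ j, k ≤ j → j < cs.length → cs[j]? ≠ some '"') :
    pvFt cs k = none := by
  rw [pvFt]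
  split
  next hlt =>
    have hq := h k (Nat.le_refl _) hlt
    have hterm : pvTerm cs k = false := by simp [pvTerm, hq]
    rw [if_neg (by simp [hterm])]
    exact pvFt_none cs (k+1) (fun j h1 h2 => h j (by omega) h2)
  next => rfl
termination_by cs.length - k

theorem pvFt_first (cs : List Char) (k t : Nat) (ht : t < cs.length) (hterm : pvTerm cs t = true)
    (hk : k ≤ t) (hno : ∀ j, k ≤ j → j < t → cs[j]? ≠ some '"') : pvFt cs k = some t := by
  rw [pvFt]
  by_cases hkt : k = t
  · subst hkt; rw [dif_pos ht, if_pos hterm]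
  · have hklt : k < t := by omega
    have hq := hno k (Nat.le_refl _) hklt
    have hTk : pvTerm cs k = false := by simp [pvTerm, hq]
    rw [dif_pos (by omega), if_neg (by simp [hTk])]
    exact pvFt_first cs (k+1) t ht hterm (by omega) (fun j h1 h2 => hno j (by omega) h2)
termination_by t - k

theorem pvFt_skip (cs : List Char) (k t : Nat) (hk : k ≤ t)
    (hno : ∀ j, k ≤ j → j < t → cs[j]? ≠ some '"') (hterm : pvTerm cs t = false) :
    pvFt cs k = pvFt cs (t+1) := by
  by_cases hlt : k < cs.length
  · conv_lhs => rw [pvFt]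
    by_cases hkt : k = t
    · subst hkt; rw [dif_pos hlt, if_neg (by simp [hterm])]
    · have hklt : k < t := by omega
      have hq := hno k (Nat.le_refl _) hklt
      have hTk : pvTerm cs k = false := by simp [pvTerm, hq]
      rw [dif_pos hlt, if_neg (by simp [hTk])]
      exact pvFt_skip cs (k+1) t (by omega) (fun j h1 h2 => hno j (by omega) h2) hterm
  · rw [pvFt_stop cs k hlt, pvFt_stop cs (t+1) (by omega)]
termination_by t - k

theorem pvALoop_eq (cs : List Char) (f : Nat) : ∀ (k : Nat) (acc : List Char), cs.length + 1 - k ≤ f →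
    pvALoop cs f (k : Int) acc =
      (match pvFt cs k with
       | some j => ((j : Int), String.ofList (acc ++ (cs.drop k).take (j - k)))
       | none => (0, "")) := by
  induction f with
  | zero =>
    intro k acc hf
    rw [pvFt_stop cs k (by omega)]
    rfl
  | succ f ih =>
    intro k acc hf
    by_cases hlt : k < cs.length
    · have hcast : ((k : Int) < (cs.length : Int)) := by exact_mod_cast hlt
      have hget : PySem.List.pyGet? cs (k : Int) = some cs[k] := by
        simp [PySem.List.pyGet?_natCast, List.getElem?_eq_getElem hlt]
      rw [pvALoop, if_pos hcast, hget]
      show (if (cs[k] == '"' && pvStringEnd cs ((k : Int)+1)) = true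
              then ((k : Int), String.ofList acc)
              else pvALoop cs f ((k : Int)+1) (acc ++ [cs[k]])) = _
      have hcond : (cs[k] == '"' && pvStringEnd cs ((k : Int)+1)) = pvTerm cs k := by
        simp [pvTerm, List.getElem?_eq_getElem hlt]
      rw [hcond]
      by_cases hT : pvTerm cs k = true
      · rw [if_pos hT]
        rw [pvFt, dif_pos hlt, if_pos hT]
        simp
      · rw [if_neg hT]
        have hstep : ((k : Int) + 1) = ((k+1 : Nat) : Int) := by push_cast; ring
        rw [hstep, ih (k+1) (acc ++ [cs[k]]) (by omega)]
        have hft : pvFt cs k = pvFt cs (k+1) := by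
          conv_lhs => rw [pvFt]
          rw [dif_pos hlt, if_neg hT]
        rw [hft]
        cases hres : pvFt cs (k+1) with
        | none => rfl
        | some j =>
          have hj := pvFt_ge cs (k+1) j hres
          have hdrop : (cs.drop k).take (j - k) = cs[k] :: (cs.drop (k+1)).take (j - (k+1)) := by
            rw [List.drop_eq_getElem_cons hlt]
            have h2 : j - k = (j - (k+1)) + 1 := by omega
            rw [h2, List.take_succ_cons]
          simp [hdrop]
    · rw [pvALoop, if_neg (by exact_mod_cast hlt), pvFt_stop cs k hlt]

theorem pvQuoteAt_prefix (cs : List Char) (j : Nat) (hj : j < cs.length) (hq : cs[j]? = some '"') :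
    ['"'] <+: cs.drop j := by
  have hd : cs.drop j = '"' :: cs.drop (j+1) := by
    rw [List.drop_eq_getElem_cons hj]
    rw [List.getElem?_eq_getElem hj] at hq
    simp at hq
    rw [hq]
  exact ⟨cs.drop (j+1), by simp [hd]⟩

theorem pvBLoop_eq (cs : List Char) (start : Int) (f : Nat) : ∀ (k : Nat), k ≤ cs.length →
    cs.length + 1 - k ≤ f →
    pvBLoop cs start f (k : Int) =
      (match pvFt cs k with
       | some j => ((j : Int), String.ofList (PySem.List.slice cs (some (start+1)) (some (j : Int))))
       | none => (0, "")) := by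
  induction f with
  | zero => intro k hk hf; omega
  | succ f ih =>
    intro k hk hf
    rw [pvBLoop]
    show (if (PySem.Chars.findFrom cs ['"'] (k : Int) none == -1) = true then ((0 : Int), "")
          else if pvStringEnd cs (PySem.Chars.findFrom cs ['"'] (k : Int) none + 1) = true
            then (PySem.Chars.findFrom cs ['"'] (k : Int) none,
              String.ofList (PySem.List.slice cs (some (start+1)) (some (PySem.Chars.findFrom cs ['"'] (k : Int) none))))
          else pvBLoop cs start f (PySem.Chars.findFrom cs ['"'] (k : Int) none + 1)) = _
    by_cases hq : PySem.Chars.findFrom cs ['"'] (k : Int) none = -1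
    · rw [if_pos (by simp [hq])]
      have hnin : ¬ (['"'] <:+: cs.drop k) :=
        (PySem.Chars.findFrom_natCast_eq_neg_one_iff cs ['"'] k hk).mp hq
      have hnone : pvFt cs k = none := by
        apply pvFt_none
        intro j h1 h2 hqq
        apply hnin
        apply (List.singleton_infix_iff '"' (cs.drop k)).mpr
        have hpref := pvQuoteAt_prefix cs j h2 hqq
        have : '"' ∈ cs.drop j := hpref.mem (by simp)
        have hdd : cs.drop j = (cs.drop k).drop (j - k) := by
          rw [List.drop_drop]; congr 1; omega
        rw [hdd] at this
        exact List.mem_of_mem_drop this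
      rw [hnone]
    · rw [if_neg (by simp [hq])]
      obtain ⟨hge, hpre, hmin⟩ := PySem.Chars.findFrom_natCast_spec cs ['"'] k hk hq
      set q := PySem.Chars.findFrom cs ['"'] (k : Int) none with hqd
      have hq0 : 0 ≤ q := le_trans (by exact_mod_cast Nat.zero_le k) hge
      set t := q.toNat with htd
      have hqt : q = ((t : Nat) : Int) := (Int.toNat_of_nonneg hq0).symm
      obtain ⟨u, hu⟩ : ∃ u, cs.drop t = '"' :: u := by
        obtain ⟨u, hu⟩ := hpre; exact ⟨u, by simpa using hu.symm⟩
      have htlen : t < cs.length := by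
        by_contra hc
        rw [List.drop_eq_nil_of_le (by omega)] at hu
        cases hu
      have htq : cs[t]? = some '"' := by
        have hdc : cs.drop t = cs[t] :: cs.drop (t+1) := List.drop_eq_getElem_cons htlen
        rw [hdc] at hu
        have hh := congrArg List.head? hu
        simp only [List.head?_cons, Option.some.injEq] at hh
        rw [List.getElem?_eq_getElem htlen, hh]
      have hkt : k ≤ t := by omega
      have hno : ∀ j, k ≤ j → j < t → cs[j]? ≠ some '"' := by
        intro j h1 h2 hqq
        exact hmin j h1 (by omega) (pvQuoteAt_prefix cs j (by omega) hqq)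
      by_cases hSE : pvStringEnd cs (q + 1) = true
      · rw [if_pos hSE]
        have hterm : pvTerm cs t = true := by
          have hse' : pvStringEnd cs ((t : Int) + 1) = true := by rw [← hqt]; exact hSE
          simp [pvTerm, htq, hse']
        rw [pvFt_first cs k t htlen hterm hkt hno, hqt]
      · rw [if_neg hSE]
        have hterm : pvTerm cs t = false := by
          have hse' : pvStringEnd cs ((t : Int) + 1) = false := by
            rw [← hqt]; exact eq_false_of_ne_true hSE
          simp [pvTerm, hse']
        have hstep : q + 1 = ((t + 1 : Nat) : Int) := by rw [hqt]; push_cast; ring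
        rw [hstep, ih (t+1) (by omega) (by omega)]
        rw [pvFt_skip cs k t hkt hno hterm]

-- ===== VERDICT (by name: the statement is the Claim_ definition above) =====
theorem read_path_string_py_spec : Claim_equal_read_path_string_py := by
  intro text start hDom hPre
  obtain ⟨h1, h2⟩ := hPre
  unfold Spec_read_path_string_py read_path_string_py read_path_string_py_alt
  set cs := text.toList with hcs
  obtain ⟨j, hjmem, hj⟩ := List.any_eq_true.mp h2
  rw [Bool.and_eq_true, decide_eq_true_iff] at hj
  have hjlen : j < cs.length := List.mem_range.mp hjmem
  have hk0 : 0 ≤ start + 1 := by omega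
  set k := (start + 1).toNat with hkd
  have hkc : ((k : Nat) : Int) = start + 1 := Int.toNat_of_nonneg hk0
  have hklen : k ≤ cs.length := by omega
  rw [← hkc, pvALoop_eq cs (cs.length + 1) k [] (by omega),
      pvBLoop_eq cs start (cs.length + 1) k hklen (by omega)]
  cases hft : pvFt cs k with
  | none => rfl
  | some j' =>
    have hslice : PySem.List.slice cs (some (start+1)) (some ((j' : Nat) : Int)) =
        (cs.drop k).take (j' - k) := by
      rw [← hkc]
      exact PySem.List.slice_natCast cs k j'
    simp [hslice]
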